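-- pv_equiv track=rewrite | github.com/hyo-eun-kim/algorithm-study | ch19/misung/ch18_review.py | solution
-- ===== SOURCE A (Python) =====
-- def solution(n, times):
--     left , right = 1, max(times)*n # right = 최악의 경우 = 가장 비효율적인 심사관에서 다 받는경우
--     answer = 0
--     while left<=right :
--         mid =(left+right)//2  # 한 심사관에게 주어진 시간
--         people =0
--         for i in times:
--             people +=mid//i  # 각 심사관마다 주어진 시간동안 심사할수 있는 사람의 수
--
--             if people>=n: # 모든 사람을 심사하면 반복문 끝
--                 answer =mid
--                 right = mid-1  # 모든 사람을 심사할수 있으면 시간을 줄여본다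
--                 break
--
--
--
--         if people<n: # 모든 사람을 심사할수 없는경우, 한 심사관에게 주어진 시간을 늘려본다.
--             left = mid+1
--     return answer
-- ===== SOURCE B (Python) =====
-- def solution(n, times):
--     hi = max(times) * n
--
--     def enough(t):
--         # can the inspectors handle everyone within t minutes?
--         need = n
--         for i in times:
--             need -= t // i
--             if need <= 0:
--                 return True
--         return False
--
--     def search(lo, hi):
--         # smallest feasible time probed in [lo, hi], 0 if none
--         if lo > hi:
--             return 0
--         mid = (lo + hi) // 2
--         if enough(mid):
--             return search(lo, mid - 1) or mid
--         return search(mid + 1, hi)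
--
--     return search(1, hi)
-- ===== Notes on version B (the rewrite author's own statement) =====
-- stated objective: alternative
-- what changed: The while-loop with mutable left/right/answer and a break-flag inner scan becomes a recursive bisection that rebuilds the answer on the way back ('search(lo,mid-1) or mid'), with the feasibility test extracted into a predicate that counts the remaining people down to zero instead of accumulating a total against n.
-- outside the precondition, e.g. on solution(1, [1, 0]): A returns 1, B returns 1
import Mathlib
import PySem

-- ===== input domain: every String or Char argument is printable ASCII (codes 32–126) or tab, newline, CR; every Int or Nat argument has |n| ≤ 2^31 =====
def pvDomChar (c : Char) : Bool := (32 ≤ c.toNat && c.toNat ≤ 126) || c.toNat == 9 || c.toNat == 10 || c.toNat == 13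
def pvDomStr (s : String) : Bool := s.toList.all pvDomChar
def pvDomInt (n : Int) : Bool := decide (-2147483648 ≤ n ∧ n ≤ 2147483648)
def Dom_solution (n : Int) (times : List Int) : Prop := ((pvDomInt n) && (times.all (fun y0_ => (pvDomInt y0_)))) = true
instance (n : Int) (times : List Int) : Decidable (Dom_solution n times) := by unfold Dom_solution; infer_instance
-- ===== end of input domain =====

-- B replaces A's while-loop with mutable left/right/answer and break-flag inner scan by a
-- recursive bisection with an extracted short-circuit feasibility predicate that counts the
-- remaining people down, building the answer on the way back (objective: alternative, not faster).

-- ===== PORT A =====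
-- inner 'for i in times' loop: accumulates people, returns (people, broke?)
def pvScanA (n mid : Int) : List Int → Int → Int × Bool
  | [], people => (people, false)
  | i :: rest, people =>
    let p := people + PySem.Int.floordiv mid i
    if n ≤ p then (p, true) else pvScanA n mid rest p

-- the 'while left<=right' loop over state (left, right, answer)
def pvLoopA (n : Int) (times : List Int) (left right answer : Int) : Int :=
  if _h : left ≤ right then
    let mid := PySem.Int.floordiv (left + right) 2
    match pvScanA n mid times 0 with
    | (_, true) => pvLoopA n times left (mid - 1) mid
    | (people, false) =>
      if people < n then pvLoopA n times (mid + 1) right answer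
      else answer
  else answer
termination_by (right + 1 - left).toNat
decreasing_by
  · have := PySem.Int.floordiv_two_mid_bounds _h
    omega
  · have := PySem.Int.floordiv_two_mid_bounds _h
    omega

def solution (n : Int) (times : List Int) : Int :=
  match PySem.List.max? times (fun x => x) with
  | none => 0
  | some m => pvLoopA n times 1 (m * n) 0

-- ===== PORT B =====
-- Source B's 'enough': need starts at n and is counted down, short-circuiting at need <= 0
def pvEnoughGo (t : Int) : List Int → Int → Bool
  | [], _ => false
  | i :: rest, need =>
    let need' := need - PySem.Int.floordiv t i
    if need' ≤ 0 then true else pvEnoughGo t rest need'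

def pvEnough (n : Int) (times : List Int) (t : Int) : Bool := pvEnoughGo t times n

-- Source B's 'search': smallest feasible time probed in [lo, hi], 0 if none ('or' = if 0)
def pvSearchB (n : Int) (times : List Int) (lo hi : Int) : Int :=
  if _h : lo ≤ hi then
    let mid := PySem.Int.floordiv (lo + hi) 2
    if pvEnough n times mid then
      let s := pvSearchB n times lo (mid - 1)
      if s = 0 then mid else s
    else pvSearchB n times (mid + 1) hi
  else 0
termination_by (hi + 1 - lo).toNat
decreasing_by
  · have := PySem.Int.floordiv_two_mid_bounds _h
    omega
  · have := PySem.Int.floordiv_two_mid_bounds _h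
    omega

def solution_alt (n : Int) (times : List Int) : Int :=
  match PySem.List.max? times (fun x => x) with
  | none => 0
  | some m => pvSearchB n times 1 (m * n)

-- ===== PRECONDITION & SPEC =====
-- Pre_ excludes the empty list (max(times) raises ValueError) and lists containing 0:
-- on those A raises ZeroDivisionError at the first probed time whose scan reaches the 0,
-- which happens on almost all of them; on the rare ones where every probe's early break
-- precedes the 0 (not a closed-form condition) A and B return the same value anyway.
def Pre_solution (n : Int) (times : List Int) : Prop := times ≠ [] ∧ ¬ (0 : Int) ∈ times
instance (n : Int) (times : List Int) : Decidable (Pre_solution n times) := by unfold Pre_solution; infer_instance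
def pvWitness_solution : Int × List Int := (6, [7, 10])

def Spec_solution (n : Int) (times : List Int) (out : Int) : Prop := out = solution_alt n times
instance (n : Int) (times : List Int) (out : Int) : Decidable (Spec_solution n times out) := by unfold Spec_solution; infer_instance

-- ===== CLAIM (what is proved, stated in full; the proofs are below) =====
def Claim_equal_solution : Prop := ∀ (n : Int) (times : List Int), Dom_solution n times → Pre_solution n times → Spec_solution n times (solution n times)

-- ===== LEMMAS AND PROOFS =====

-- A's break flag is exactly B's count-down predicate (same divisions, same cut-off point)
theorem pvScanA_snd_eq_enoughGo (n mid : Int) :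
    ∀ (times : List Int) (people : Int),
      (pvScanA n mid times people).2 = pvEnoughGo mid times (n - people) := by
  intro times
  induction times with
  | nil => intro people; simp [pvScanA, pvEnoughGo]
  | cons i rest ih =>
    intro people
    simp only [pvScanA, pvEnoughGo]
    by_cases hc : n ≤ people + PySem.Int.floordiv mid i
    · rw [if_pos hc, if_pos (by omega)]
    · rw [if_neg hc, if_neg (by omega)]
      rw [ih]
      ring_nf

-- on a nonempty list, 'no break' forces people < n (so A's trailing if fires)
theorem pvScanA_no_break_lt (n mid : Int) :
    ∀ (times : List Int) (people p : Int), times ≠ [] →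
      pvScanA n mid times people = (p, false) → p < n := by
  intro times
  induction times with
  | nil => intro _ _ h; exact absurd rfl h
  | cons i rest ih =>
    intro people p _ hs
    simp only [pvScanA] at hs
    by_cases hc : n ≤ people + PySem.Int.floordiv mid i
    · rw [if_pos hc] at hs; exact absurd hs (by simp)
    · rw [if_neg hc] at hs
      rcases rest with _ | ⟨j, rest'⟩
      · simp [pvScanA] at hs; omega
      · exact ih _ _ (by simp) hs

-- the two loops walk the same bisection path; B rebuilds A's 'answer' on the way back
theorem pvLoop_eq_search (n : Int) (times : List Int) (hne : times ≠ []) :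
    ∀ (k : Nat) (l r a : Int), (r + 1 - l).toNat = k → 1 ≤ l →
      pvLoopA n times l r a =
        (if pvSearchB n times l r = 0 then a else pvSearchB n times l r) := by
  intro k
  induction k using Nat.strong_induction_on with
  | _ k IH =>
    intro l r a hk hl
    rw [pvLoopA, pvSearchB]
    by_cases hlr : l ≤ r
    · rw [dif_pos hlr, dif_pos hlr]
      have hmid := PySem.Int.floordiv_two_mid_bounds hlr
      set mid := PySem.Int.floordiv (l + r) 2 with hmiddef
      match hs : pvScanA n mid times 0 with
      | (people, true) =>
        have hen : pvEnough n times mid = true := by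
          have := pvScanA_snd_eq_enoughGo n mid times 0
          rw [hs] at this
          simpa [pvEnough] using this.symm
        have hrec := IH ((mid - 1) + 1 - l).toNat (by omega) l (mid - 1) mid rfl hl
        simp only [hs, hen, if_true, hrec]
        by_cases hz : pvSearchB n times l (mid - 1) = 0
        · rw [if_pos hz, if_neg (show ¬ mid = 0 by omega)]
        · rw [if_neg hz, if_neg hz]
      | (people, false) =>
        have hen : pvEnough n times mid = false := by
          have := pvScanA_snd_eq_enoughGo n mid times 0
          rw [hs] at this
          simpa [pvEnough] using this.symm
        have hlt : people < n := pvScanA_no_break_lt n mid times 0 people hne hs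
        simp only [hs, hen, Bool.false_eq_true, if_false, if_pos hlt]
        exact IH (r + 1 - (mid + 1)).toNat (by omega) (mid + 1) r a rfl (by omega)
    · rw [dif_neg hlr, dif_neg hlr, if_pos rfl]

-- ===== VERDICT (by name: the statement is the Claim_ definition above) =====
theorem solution_spec : Claim_equal_solution := by
  intro n times _hdom hpre
  unfold Spec_solution solution solution_alt
  rcases hm : PySem.List.max? times (fun x => x) with _ | m
  · exact absurd ((PySem.List.max?_eq_none_iff times (fun x => x)).1 hm) hpre.1
  · show pvLoopA n times 1 (m * n) 0 = pvSearchB n times 1 (m * n)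
    have := pvLoop_eq_search n times hpre.1 ((m * n) + 1 - 1).toNat 1 (m * n) 0 rfl le_rfl
    rw [this]
    by_cases hz : pvSearchB n times 1 (m * n) = 0
    · rw [if_pos hz, hz]
    · rw [if_neg hz]
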